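-- pv_equiv track=rewrite | github.com/mluckau/autodarts-caller-xt | autodarts-caller.py | grab_caller_gender
-- ===== SOURCE A (Python) =====
-- CALLER_GENDERS = {
--     1: ["female", "f"],
--     2: ["male", "m"],
-- }
--
-- def grab_caller_gender(caller_name):
--     first_occurrences = []
--     caller_name = "-" + caller_name + "-"
--     for key in CALLER_GENDERS:
--         for tag in CALLER_GENDERS[key]:
--             tag_with_dashes = "-" + tag + "-"
--             index = caller_name.find(tag_with_dashes)
--             if index != -1:  # find returns -1 if the tag is not found
--                 first_occurrences.append((index, key))
--
--     if not first_occurrences:  # if the list is empty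
--         return None
--
--     # Sort the list of first occurrences and get the gender of the tag that appears first
--     first_occurrences.sort(key=lambda x: x[0])
--     return first_occurrences[0][1]
--
--     first_occurrences = []
--     for key in CALLER_GENDERS:
--         for tag in CALLER_GENDERS[key]:
--             index = caller_name.find(tag)
--             if index != -1:  # find returns -1 if the tag is not found
--                 first_occurrences.append((index, key))
--
--     if not first_occurrences:  # if the list is empty
--         return None
--
--     # Sort the list of first occurrences and get the gender of the tag that appears first
--     first_occurrences.sort(key=lambda x: x[0])
--     return first_occurrences[0][1]
-- ===== SOURCE B (Python) =====
-- CALLER_GENDERS = {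
--     1: ["female", "f"],
--     2: ["male", "m"],
-- }
--
-- def grab_caller_gender(caller_name):
--     # Position-major scan: walk the wrapped name left to right and return the
--     # key of the first dash-delimited tag starting at the current position.
--     wrapped = "-" + caller_name + "-"
--     tags = [(key, "-" + tag + "-") for key in CALLER_GENDERS for tag in CALLER_GENDERS[key]]
--     for i in range(len(wrapped)):
--         for key, t in tags:
--             if wrapped.startswith(t, i):
--                 return key
--     return None
-- ===== Notes on version B (the rewrite author's own statement) =====
-- stated objective: alternative
-- what changed: Replaces A's tag-major strategy (run str.find for every tag, collect (index,key) pairs, sort by index, take the first) with a position-major single left-to-right scan of the wrapped name that returns the key of the first dash-delimited tag starting at the current position; no find(), no intermediate list, no sort.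
import Mathlib
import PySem

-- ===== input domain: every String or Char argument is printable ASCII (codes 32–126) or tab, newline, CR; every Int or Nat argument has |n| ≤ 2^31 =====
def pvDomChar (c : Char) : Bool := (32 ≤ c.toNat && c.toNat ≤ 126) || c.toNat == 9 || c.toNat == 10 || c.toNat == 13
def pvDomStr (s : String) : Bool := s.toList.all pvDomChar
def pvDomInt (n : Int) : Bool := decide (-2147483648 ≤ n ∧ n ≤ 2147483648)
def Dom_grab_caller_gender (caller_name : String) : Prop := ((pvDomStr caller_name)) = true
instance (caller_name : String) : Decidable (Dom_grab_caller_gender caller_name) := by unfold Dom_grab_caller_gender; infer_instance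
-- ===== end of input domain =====

-- B replaces A's tag-major find/collect/sort with a position-major left-to-right scan
-- of the wrapped name that returns at the first position where a delimited tag starts.

-- module-level constant CALLER_GENDERS, shared by both implementations (as in the Python module)
def CALLER_GENDERS : List (Int × List (List Char)) :=
  [(1, [['f','e','m','a','l','e'], ['f']]), (2, [['m','a','l','e'], ['m']])]

-- ===== PORT A =====
def grab_caller_gender (caller_name : String) : Option Int :=
  let cn : List Char := '-' :: caller_name.toList ++ ['-']
  let first_occurrences : List (Int × Int) :=
    CALLER_GENDERS.foldl (fun acc kv =>
      kv.2.foldl (fun acc tag =>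
        let tag_with_dashes := '-' :: tag ++ ['-']
        let index := PySem.Chars.find cn tag_with_dashes
        if index ≠ -1 then acc ++ [(index, kv.1)] else acc) acc) []
  if first_occurrences = [] then none
  else (PySem.List.pyGet? (PySem.List.sorted first_occurrences (fun x => x.1) false) 0).map Prod.snd

-- ===== PORT B =====
-- the flattened (key, "-tag-") list Source B builds by comprehension
def tagsB : List (Int × List Char) :=
  CALLER_GENDERS.foldl (fun acc kv => acc ++ kv.2.map (fun tag => (kv.1, '-' :: tag ++ ['-']))) []

-- the position loop: 'for i in range(len(wrapped))' walked as suffixes of wrapped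
def scanB : List Char → Option Int
  | [] => none
  | c :: t =>
    match tagsB.find? (fun kt => kt.2.isPrefixOf (c :: t)) with
    | some kt => some kt.1
    | none => scanB t

def grab_caller_gender_alt (caller_name : String) : Option Int :=
  scanB ('-' :: caller_name.toList ++ ['-'])

-- ===== PRECONDITION & SPEC =====
def Spec_grab_caller_gender (caller_name : String) (out : Option Int) : Prop := out = grab_caller_gender_alt caller_name
instance (caller_name : String) (out : Option Int) : Decidable (Spec_grab_caller_gender caller_name out) := by unfold Spec_grab_caller_gender; infer_instance

-- ===== CLAIM =====
def Claim_equal_grab_caller_gender : Prop := ∀ (caller_name : String), Dom_grab_caller_gender caller_name → Spec_grab_caller_gender caller_name (grab_caller_gender caller_name)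

-- ===== LEMMAS AND PROOFS =====

-- strict running minimum (keeps the earlier element on ties, like a stable sort)
def minStep (b : Option (Int × Int)) (x : Int × Int) : Option (Int × Int) :=
  match b with | none => some x | some q => if x.1 < q.1 then some x else some q

-- conditional min step: skip absent (-1) finds
def mstep (b : Option (Int × Int)) (f k : Int) : Option (Int × Int) :=
  if f = -1 then b else minStep b (f, k)

-- A's answer as a function of the four find results
def amin (f1 f2 f3 f4 : Int) : Option Int :=
  (mstep (mstep (mstep (mstep none f1 1) f2 1) f3 2) f4 2).map Prod.snd

lemma head_insertBy (x : Int × Int) (ys : List (Int × Int)) :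
    (PySem.List.insertBy (fun a b => decide (a.1 < b.1)) x ys).head? =
      minStep ys.head? x := by
  cases ys <;> simp [PySem.List.insertBy, minStep] <;> split_ifs <;> simp_all

lemma head_foldl_insertBy (L : List (Int × Int)) (acc : List (Int × Int)) :
    (L.foldl (fun acc x => PySem.List.insertBy (fun a b => decide (a.1 < b.1)) x acc) acc).head?
      = L.foldl minStep acc.head? := by
  induction L generalizing acc with
  | nil => rfl
  | cons x t ih => simp only [List.foldl, ih, head_insertBy]

-- the head of Python's stable sort by first component is the strict running minimum
lemma head_sorted (L : List (Int × Int)) :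
    (PySem.List.sorted L (fun x => x.1) false).head? = L.foldl minStep none := by
  rw [PySem.List.sorted_eq_foldl_insertBy]
  simpa using head_foldl_insertBy L []

-- A's port as the amin combination of the four finds
lemma A_eq (s : String) :
    grab_caller_gender s =
      amin (PySem.Chars.find ('-' :: s.toList ++ ['-']) ['-','f','e','m','a','l','e','-'])
           (PySem.Chars.find ('-' :: s.toList ++ ['-']) ['-','f','-'])
           (PySem.Chars.find ('-' :: s.toList ++ ['-']) ['-','m','a','l','e','-'])
           (PySem.Chars.find ('-' :: s.toList ++ ['-']) ['-','m','-']) := by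
  set ts := s.toList with hts
  simp only [grab_caller_gender, CALLER_GENDERS, List.foldl,
    PySem.List.pyGet?_zero, ← List.head?_eq_getElem?, head_sorted,
    List.cons_append, List.nil_append, ← hts]
  by_cases h1 : PySem.Chars.find ('-' :: (ts ++ ['-'])) ['-','f','e','m','a','l','e','-'] = -1 <;>
  by_cases h2 : PySem.Chars.find ('-' :: (ts ++ ['-'])) ['-','f','-'] = -1 <;>
  by_cases h3 : PySem.Chars.find ('-' :: (ts ++ ['-'])) ['-','m','a','l','e','-'] = -1 <;>
  by_cases h4 : PySem.Chars.find ('-' :: (ts ++ ['-'])) ['-','m','-'] = -1 <;>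
    simp [h1, h2, h3, h4, amin, mstep, minStep]

-- find on a cons: hit at the head, or shift the tail's result by one
lemma find_cons (c : Char) (t pat : List Char) (hpat : pat ≠ []) :
    PySem.Chars.find (c :: t) pat =
      if pat <+: (c :: t) then 0
      else if PySem.Chars.find t pat = -1 then -1 else 1 + PySem.Chars.find t pat := by
  split_ifs with hp hm
  · -- prefix at head ⇒ find = 0
    have hne : PySem.Chars.find (c :: t) pat ≠ -1 :=
      (PySem.Chars.find_ne_neg_one_iff _ _).2 hp.isInfix
    have h0 : 0 ≤ PySem.Chars.find (c :: t) pat := by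
      have := PySem.Chars.neg_one_le_find (c :: t) pat; omega
    obtain ⟨-, hmin⟩ := PySem.Chars.find_spec h0
    by_contra hne0
    have : 0 < (PySem.Chars.find (c :: t) pat).toNat := by omega
    exact hmin 0 this (by simpa using hp)
  · -- not at head, not in tail ⇒ not in the string
    rw [PySem.Chars.find_eq_neg_one_iff]
    intro hinf
    rcases List.infix_cons_iff.1 hinf with h | h
    · exact hp h
    · exact (PySem.Chars.find_eq_neg_one_iff _ _).1 hm |>.elim h
  · -- found in the tail at m ⇒ found here at m+1
    have h0t : 0 ≤ PySem.Chars.find t pat := by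
      have := PySem.Chars.neg_one_le_find t pat; omega
    obtain ⟨hoc, hmint⟩ := PySem.Chars.find_spec h0t
    have hne : PySem.Chars.find (c :: t) pat ≠ -1 := by
      rw [PySem.Chars.find_ne_neg_one_iff]
      exact List.infix_cons_iff.2 (Or.inr ((PySem.Chars.find_ne_neg_one_iff _ _).1 hm))
    have h0 : 0 ≤ PySem.Chars.find (c :: t) pat := by
      have := PySem.Chars.neg_one_le_find (c :: t) pat; omega
    obtain ⟨hoc', hmin'⟩ := PySem.Chars.find_spec h0
    set n := (PySem.Chars.find (c :: t) pat).toNat with hn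
    set m := (PySem.Chars.find t pat).toNat with hm'
    have hn0 : n ≠ 0 := by
      intro h; apply hp; simpa [h] using hoc'
    -- occurrence at n on c::t gives occurrence at n-1 on t, so m ≤ n-1
    have hdrop : (c :: t).drop n = t.drop (n - 1) := by
      rcases Nat.exists_eq_succ_of_ne_zero hn0 with ⟨k, hk⟩
      rw [hk]; simp
    have hmn : m ≤ n - 1 := by
      by_contra hlt
      exact hmint (n - 1) (by omega) (by rw [← hdrop]; exact hoc')
    -- occurrence at m+1 on c::t gives n ≤ m+1
    have hocc : pat <+: (c :: t).drop (m + 1) := by simpa using hoc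
    have hnm : ¬ (m + 1 < n) := fun h => hmin' (m + 1) h hocc
    have : n = m + 1 := by omega
    omega

-- reduction lemmas for mstep
lemma mstep_neg (b : Option (Int × Int)) (k : Int) : mstep b (-1) k = b := by simp [mstep]

lemma mstep_none (f k : Int) (h : ¬ f = -1) : mstep none f k = some (f, k) := by
  simp [mstep, minStep, h]

lemma mstep_some (f k i j : Int) (h : ¬ f = -1) :
    mstep (some (i, j)) f k = if f < i then some (f, k) else some (i, j) := by
  simp [mstep, minStep, h]

-- amin is unchanged by shifting every present index up by one
set_option maxHeartbeats 1000000 in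
set_option maxRecDepth 8000 in
lemma amin_shift (f1 f2 f3 f4 : Int)
    (h1 : -1 ≤ f1) (h2 : -1 ≤ f2) (h3 : -1 ≤ f3) (h4 : -1 ≤ f4) :
    amin (if f1 = -1 then -1 else 1 + f1) (if f2 = -1 then -1 else 1 + f2)
         (if f3 = -1 then -1 else 1 + f3) (if f4 = -1 then -1 else 1 + f4)
      = amin f1 f2 f3 f4 := by
  by_cases e1 : f1 = -1 <;> by_cases e2 : f2 = -1 <;> by_cases e3 : f3 = -1 <;> by_cases e4 : f4 = -1 <;>
    simp only [amin, e1, e2, e3, e4]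
  all_goals (repeat first
    | rw [mstep_neg]
    | rw [mstep_none _ _ (by omega)]
    | rw [mstep_some _ _ _ _ (by omega)])
  all_goals try (split_ifs <;> (try omega))
  all_goals (repeat first
    | rw [mstep_neg]
    | rw [mstep_none _ _ (by omega)]
    | rw [mstep_some _ _ _ _ (by omega)])
  all_goals try (split_ifs <;> (try omega))
  all_goals (repeat first
    | rw [mstep_neg]
    | rw [mstep_none _ _ (by omega)]
    | rw [mstep_some _ _ _ _ (by omega)])
  all_goals try (split_ifs <;> (try omega))
  all_goals (repeat first
    | rw [mstep_neg]
    | rw [mstep_none _ _ (by omega)]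
    | rw [mstep_some _ _ _ _ (by omega)])
  all_goals try (split_ifs <;> (try omega))
  all_goals first | rfl | omega | exact (False.elim ‹False›)


set_option maxHeartbeats 1000000 in
set_option maxRecDepth 8000 in
lemma amin_1 (f2 f3 f4 : Int) (h2 : -1 ≤ f2) (h3 : -1 ≤ f3) (h4 : -1 ≤ f4) :
    amin 0 f2 f3 f4 = some 1 := by
  by_cases e2 : f2 = -1 <;> by_cases e3 : f3 = -1 <;> by_cases e4 : f4 = -1 <;>
    simp only [amin, e2, e3, e4]
  all_goals (repeat first
    | rw [mstep_neg]
    | rw [mstep_none _ _ (by omega)]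
    | rw [mstep_some _ _ _ _ (by omega)])
  all_goals try (split_ifs <;> (try omega))
  all_goals (repeat first
    | rw [mstep_neg]
    | rw [mstep_none _ _ (by omega)]
    | rw [mstep_some _ _ _ _ (by omega)])
  all_goals try (split_ifs <;> (try omega))
  all_goals (repeat first
    | rw [mstep_neg]
    | rw [mstep_none _ _ (by omega)]
    | rw [mstep_some _ _ _ _ (by omega)])
  all_goals try (split_ifs <;> (try omega))
  all_goals (repeat first
    | rw [mstep_neg]
    | rw [mstep_none _ _ (by omega)]
    | rw [mstep_some _ _ _ _ (by omega)])
  all_goals try (split_ifs <;> (try omega))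
  all_goals first | rfl | omega | exact (False.elim ‹False›)


set_option maxHeartbeats 1000000 in
set_option maxRecDepth 8000 in
lemma amin_2 (f1 f3 f4 : Int) (h1 : 1 ≤ f1 ∨ f1 = -1) (h3 : -1 ≤ f3) (h4 : -1 ≤ f4) :
    amin f1 0 f3 f4 = some 1 := by
  by_cases e1 : f1 = -1 <;> by_cases e3 : f3 = -1 <;> by_cases e4 : f4 = -1 <;>
    simp only [amin, e1, e3, e4]
  all_goals (repeat first
    | rw [mstep_neg]
    | rw [mstep_none _ _ (by omega)]
    | rw [mstep_some _ _ _ _ (by omega)])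
  all_goals try (split_ifs <;> (try omega))
  all_goals (repeat first
    | rw [mstep_neg]
    | rw [mstep_none _ _ (by omega)]
    | rw [mstep_some _ _ _ _ (by omega)])
  all_goals try (split_ifs <;> (try omega))
  all_goals (repeat first
    | rw [mstep_neg]
    | rw [mstep_none _ _ (by omega)]
    | rw [mstep_some _ _ _ _ (by omega)])
  all_goals try (split_ifs <;> (try omega))
  all_goals (repeat first
    | rw [mstep_neg]
    | rw [mstep_none _ _ (by omega)]
    | rw [mstep_some _ _ _ _ (by omega)])
  all_goals try (split_ifs <;> (try omega))
  all_goals first | rfl | omega | exact (False.elim ‹False›)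


set_option maxHeartbeats 1000000 in
set_option maxRecDepth 8000 in
lemma amin_3 (f1 f2 f4 : Int) (h1 : 1 ≤ f1 ∨ f1 = -1) (h2 : 1 ≤ f2 ∨ f2 = -1)
    (h4 : -1 ≤ f4) : amin f1 f2 0 f4 = some 2 := by
  by_cases e1 : f1 = -1 <;> by_cases e2 : f2 = -1 <;> by_cases e4 : f4 = -1 <;>
    simp only [amin, e1, e2, e4]
  all_goals (repeat first
    | rw [mstep_neg]
    | rw [mstep_none _ _ (by omega)]
    | rw [mstep_some _ _ _ _ (by omega)])
  all_goals try (split_ifs <;> (try omega))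
  all_goals (repeat first
    | rw [mstep_neg]
    | rw [mstep_none _ _ (by omega)]
    | rw [mstep_some _ _ _ _ (by omega)])
  all_goals try (split_ifs <;> (try omega))
  all_goals (repeat first
    | rw [mstep_neg]
    | rw [mstep_none _ _ (by omega)]
    | rw [mstep_some _ _ _ _ (by omega)])
  all_goals try (split_ifs <;> (try omega))
  all_goals (repeat first
    | rw [mstep_neg]
    | rw [mstep_none _ _ (by omega)]
    | rw [mstep_some _ _ _ _ (by omega)])
  all_goals try (split_ifs <;> (try omega))
  all_goals first | rfl | omega | exact (False.elim ‹False›)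


set_option maxHeartbeats 1000000 in
set_option maxRecDepth 8000 in
lemma amin_4 (f1 f2 f3 : Int) (h1 : 1 ≤ f1 ∨ f1 = -1) (h2 : 1 ≤ f2 ∨ f2 = -1)
    (h3 : 1 ≤ f3 ∨ f3 = -1) : amin f1 f2 f3 0 = some 2 := by
  by_cases e1 : f1 = -1 <;> by_cases e2 : f2 = -1 <;> by_cases e3 : f3 = -1 <;>
    simp only [amin, e1, e2, e3]
  all_goals (repeat first
    | rw [mstep_neg]
    | rw [mstep_none _ _ (by omega)]
    | rw [mstep_some _ _ _ _ (by omega)])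
  all_goals try (split_ifs <;> (try omega))
  all_goals (repeat first
    | rw [mstep_neg]
    | rw [mstep_none _ _ (by omega)]
    | rw [mstep_some _ _ _ _ (by omega)])
  all_goals try (split_ifs <;> (try omega))
  all_goals (repeat first
    | rw [mstep_neg]
    | rw [mstep_none _ _ (by omega)]
    | rw [mstep_some _ _ _ _ (by omega)])
  all_goals try (split_ifs <;> (try omega))
  all_goals (repeat first
    | rw [mstep_neg]
    | rw [mstep_none _ _ (by omega)]
    | rw [mstep_some _ _ _ _ (by omega)])
  all_goals try (split_ifs <;> (try omega))
  all_goals first | rfl | omega | exact (False.elim ‹False›)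


-- after find_cons with ¬prefix, the shifted find is never 0
lemma shift_ne_zero (f : Int) (h : -1 ≤ f) :
    1 ≤ (if f = -1 then -1 else 1 + f) ∨ (if f = -1 then -1 else 1 + f) = -1 := by
  split_ifs <;> omega

lemma tagsB_eq : tagsB =
    [(1, ['-','f','e','m','a','l','e','-']), (1, ['-','f','-']),
     (2, ['-','m','a','l','e','-']), (2, ['-','m','-'])] := by rfl

-- B's scan equals A's amin of the four finds, for every character list
lemma scan_eq (s : List Char) :
    scanB s = amin (PySem.Chars.find s ['-','f','e','m','a','l','e','-'])
                   (PySem.Chars.find s ['-','f','-'])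
                   (PySem.Chars.find s ['-','m','a','l','e','-'])
                   (PySem.Chars.find s ['-','m','-']) := by
  induction s with
  | nil =>
    have h : ∀ pat : List Char, pat ≠ [] → PySem.Chars.find [] pat = -1 := by
      intro pat hp
      rw [PySem.Chars.find_eq_neg_one_iff]
      intro hinf
      exact hp (List.eq_nil_of_infix_nil hinf)
    rw [h _ (by simp), h _ (by simp), h _ (by simp), h _ (by simp)]
    simp [scanB, amin, mstep]
  | cons c t ih =>
    rw [find_cons c t _ (by simp), find_cons c t _ (by simp),
        find_cons c t _ (by simp), find_cons c t _ (by simp)]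
    have n1 := PySem.Chars.neg_one_le_find t ['-','f','e','m','a','l','e','-']
    have n2 := PySem.Chars.neg_one_le_find t ['-','f','-']
    have n3 := PySem.Chars.neg_one_le_find t ['-','m','a','l','e','-']
    have n4 := PySem.Chars.neg_one_le_find t ['-','m','-']
    by_cases p1 : ['-','f','e','m','a','l','e','-'] <+: (c :: t)
    · have b1 : ['-','f','e','m','a','l','e','-'].isPrefixOf (c :: t) = true :=
        List.isPrefixOf_iff_prefix.2 p1
      rw [if_pos p1, show scanB (c :: t) = some 1 by simp [scanB, tagsB_eq, b1]]
      rw [amin_1] <;> split_ifs <;> omega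
    · have b1 : ['-','f','e','m','a','l','e','-'].isPrefixOf (c :: t) = false :=
        Bool.eq_false_iff.2 (fun hb => p1 (List.isPrefixOf_iff_prefix.1 hb))
      rw [if_neg p1]
      by_cases p2 : ['-','f','-'] <+: (c :: t)
      · have b2 : ['-','f','-'].isPrefixOf (c :: t) = true := List.isPrefixOf_iff_prefix.2 p2
        rw [if_pos p2, show scanB (c :: t) = some 1 by simp [scanB, tagsB_eq, b1, b2]]
        rw [amin_2 _ _ _ (shift_ne_zero _ n1)] <;> split_ifs <;> omega
      · have b2 : ['-','f','-'].isPrefixOf (c :: t) = false :=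
          Bool.eq_false_iff.2 (fun hb => p2 (List.isPrefixOf_iff_prefix.1 hb))
        rw [if_neg p2]
        by_cases p3 : ['-','m','a','l','e','-'] <+: (c :: t)
        · have b3 : ['-','m','a','l','e','-'].isPrefixOf (c :: t) = true :=
            List.isPrefixOf_iff_prefix.2 p3
          rw [if_pos p3, show scanB (c :: t) = some 2 by simp [scanB, tagsB_eq, b1, b2, b3]]
          rw [amin_3 _ _ _ (shift_ne_zero _ n1) (shift_ne_zero _ n2)]
          split_ifs <;> omega
        · have b3 : ['-','m','a','l','e','-'].isPrefixOf (c :: t) = false :=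
            Bool.eq_false_iff.2 (fun hb => p3 (List.isPrefixOf_iff_prefix.1 hb))
          rw [if_neg p3]
          by_cases p4 : ['-','m','-'] <+: (c :: t)
          · have b4 : ['-','m','-'].isPrefixOf (c :: t) = true := List.isPrefixOf_iff_prefix.2 p4
            rw [if_pos p4, show scanB (c :: t) = some 2 by simp [scanB, tagsB_eq, b1, b2, b3, b4]]
            exact (amin_4 _ _ _ (shift_ne_zero _ n1) (shift_ne_zero _ n2)
              (shift_ne_zero _ n3)).symm
          · have b4 : ['-','m','-'].isPrefixOf (c :: t) = false :=
              Bool.eq_false_iff.2 (fun hb => p4 (List.isPrefixOf_iff_prefix.1 hb))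
            rw [if_neg p4, show scanB (c :: t) = scanB t by simp [scanB, tagsB_eq, b1, b2, b3, b4]]
            rw [ih, amin_shift _ _ _ _ n1 n2 n3 n4]

-- ===== VERDICT =====
theorem grab_caller_gender_spec : Claim_equal_grab_caller_gender := by
  intro s _
  show grab_caller_gender s = grab_caller_gender_alt s
  rw [A_eq, grab_caller_gender_alt, scan_eq]
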